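-- pv_equiv track=rewrite | github.com/ddanh2436/Futoshiki-Logic-Project | Source/futoshiki.py | run_backward_chaining
-- ===== SOURCE A (Python) =====
-- def get_var_id(i, j, v, N):
--     return (i - 1) * N**2 + (j - 1) * N + v
--
-- def build_horn_kb(clauses):
--     horn_kb = {}
--     for clause in clauses:
--         pos_lits = [l for l in clause if l > 0]
--         neg_lits = [-l for l in clause if l < 0]
--         if len(pos_lits) == 1:
--             head = pos_lits[0]
--             if head not in horn_kb:
--                 horn_kb[head] = []
--             horn_kb[head].append(neg_lits)
--     return horn_kb
--
-- def run_backward_chaining(KB, i, j, v, N):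
--     horn_kb = build_horn_kb(KB)
--     target_var = get_var_id(i, j, v, N)
--     stats = [0] # Đếm số phép suy diễn lùi
--
--     def fol_bc_ask(query_list, visited):
--         stats[0] += 1
--         if not query_list: return True
--         q = query_list[0]
--         rest_query = query_list[1:]
--         if q in visited: return False
--         visited.add(q)
--         if q in horn_kb:
--             for body in horn_kb[q]:
--                 new_query_list = body + rest_query
--                 if fol_bc_ask(new_query_list, visited.copy()):
--                     return True
--         visited.remove(q)
--         return False
--
--     res = fol_bc_ask([target_var], set())
--     return res, stats[0]
-- ===== SOURCE B (Python) =====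
-- def run_backward_chaining(KB, i, j, v, N):
--     horn = {}
--     for clause in KB:
--         pos = [l for l in clause if l > 0]
--         if len(pos) == 1:
--             horn.setdefault(pos[0], []).append([-l for l in clause if l < 0])
--     target = (i - 1) * N**2 + (j - 1) * N + v
--     count = 0
--     stack = [([target], frozenset())]
--     while stack:
--         query, visited = stack.pop()
--         count += 1
--         if not query:
--             return True, count
--         q = query[0]
--         if q in visited:
--             continue
--         rest = query[1:]
--         child_visited = visited | {q}
--         stack.extend((body + rest, child_visited) for body in reversed(horn.get(q, [])))
--     return False, count
-- ===== Notes on version B (the rewrite author's own statement) =====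
-- stated objective: alternative
-- what changed: The recursive fol_bc_ask closure (mutable shared counter, visited.add/copy()/remove) is replaced by an explicit-stack iterative preorder DFS over (query_list, visited) frames with persistent frozensets, counting frame pops and returning on the first empty query list; the Horn-KB build uses dict.setdefault instead of a membership test plus insert.
import Mathlib
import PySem

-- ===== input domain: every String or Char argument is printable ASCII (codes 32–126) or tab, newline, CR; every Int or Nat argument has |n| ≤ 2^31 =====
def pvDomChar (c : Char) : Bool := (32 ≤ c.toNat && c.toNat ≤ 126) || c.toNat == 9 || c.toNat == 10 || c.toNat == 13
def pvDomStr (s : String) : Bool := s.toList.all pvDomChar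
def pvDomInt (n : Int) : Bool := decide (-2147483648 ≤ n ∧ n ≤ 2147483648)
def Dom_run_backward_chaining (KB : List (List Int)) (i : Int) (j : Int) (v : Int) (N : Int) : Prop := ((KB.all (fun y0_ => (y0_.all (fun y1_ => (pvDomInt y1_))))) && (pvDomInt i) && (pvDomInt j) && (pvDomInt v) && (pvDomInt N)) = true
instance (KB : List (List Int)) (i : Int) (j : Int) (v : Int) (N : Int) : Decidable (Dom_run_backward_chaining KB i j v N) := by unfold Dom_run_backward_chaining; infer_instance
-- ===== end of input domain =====

-- B replaces A's recursive closure (mutable shared counter, visited.copy()/remove()) by an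
-- explicit-stack preorder DFS over frames carrying persistent visited sets; same return value
-- and identical deduction count; objective: alternative decomposition (iterative vs recursive).

-- ===== PORT A =====
def get_var_id (i j v N : Int) : Int := (i - 1) * N ^ 2 + (j - 1) * N + v

def build_horn_kb (clauses : List (List Int)) : PySem.Dict Int (List (List Int)) :=
  clauses.foldl (fun d clause =>
    let pos_lits := clause.filter (fun l => decide (l > 0))
    let neg_lits := (clause.filter (fun l => decide (l < 0))).map (fun l => -l)
    if pos_lits.length = 1 then
      let head := pos_lits.headD 0        -- pos_lits[0]; exact since pos_lits.length = 1
      -- if head not in horn_kb: horn_kb[head] = []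
      let d1 := if d.contains head then d else d.insert head []
      -- horn_kb[head].append(neg_lits)
      d1.modify head [] (fun bs => bs ++ [neg_lits])
    else d) PySem.Dict.empty

-- Termination-support lemmas the ports cite (needed to construct the proof arguments below).
lemma pvBuild_step_getD (d : PySem.Dict Int (List (List Int))) (clause : List Int) (q : Int) :
    ((fun (d : PySem.Dict Int (List (List Int))) (clause : List Int) =>
      let pos_lits := clause.filter (fun l => decide (l > 0))
      let neg_lits := (clause.filter (fun l => decide (l < 0))).map (fun l => -l)
      if pos_lits.length = 1 then
        let head := pos_lits.headD 0
        let d1 := if d.contains head then d else d.insert head []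
        d1.modify head [] (fun bs => bs ++ [neg_lits])
      else d) d clause).getD q []
    = (if (clause.filter (fun l => decide (l > 0))).length = 1 ∧
           q = (clause.filter (fun l => decide (l > 0))).headD 0 then
        d.getD q [] ++ [(clause.filter (fun l => decide (l < 0))).map (fun l => -l)]
      else d.getD q []) := by
  show ((if (clause.filter (fun l => decide (l > 0))).length = 1 then
      (if d.contains ((clause.filter (fun l => decide (l > 0))).headD 0) then d
        else d.insert ((clause.filter (fun l => decide (l > 0))).headD 0) []).modify
        ((clause.filter (fun l => decide (l > 0))).headD 0) []
        (fun bs => bs ++ [(clause.filter (fun l => decide (l < 0))).map (fun l => -l)])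
      else d).getD q []) = _
  by_cases hp : (clause.filter (fun l => decide (l > 0))).length = 1
  · rw [if_pos hp]
    by_cases hq : q = (clause.filter (fun l => decide (l > 0))).headD 0
    · by_cases hc : d.contains ((clause.filter (fun l => decide (l > 0))).headD 0) = true
      · rw [if_pos hc, PySem.Dict.getD_modify, if_pos hq, if_pos ⟨hp, hq⟩, hq]
      · have hc' : d.contains ((clause.filter (fun l => decide (l > 0))).headD 0) = false := by
          rwa [Bool.not_eq_true] at hc
        rw [if_neg hc, PySem.Dict.getD_modify, if_pos hq, PySem.Dict.getD_insert, if_pos rfl,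
          if_pos ⟨hp, hq⟩, hq, PySem.Dict.getD_of_not_contains d [] hc']
    · by_cases hc : d.contains ((clause.filter (fun l => decide (l > 0))).headD 0) = true
      · rw [if_pos hc, PySem.Dict.getD_modify, if_neg hq, if_neg (fun h => hq h.2)]
      · rw [if_neg hc, PySem.Dict.getD_modify, if_neg hq, PySem.Dict.getD_insert, if_neg hq,
          if_neg (fun h => hq h.2)]
  · rw [if_neg hp, if_neg (fun h => hp h.1)]

lemma pvBuild_aux_mem (p : Int → Prop) :
    ∀ (L : List (List Int)) (d : PySem.Dict Int (List (List Int))),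
      (∀ q body x, body ∈ d.getD q [] → x ∈ body → p x) →
      (∀ clause ∈ L, ∀ l ∈ clause, l < 0 → p (-l)) →
      ∀ q body x,
        body ∈ (L.foldl (fun d clause =>
          let pos_lits := clause.filter (fun l => decide (l > 0))
          let neg_lits := (clause.filter (fun l => decide (l < 0))).map (fun l => -l)
          if pos_lits.length = 1 then
            let head := pos_lits.headD 0
            let d1 := if d.contains head then d else d.insert head []
            d1.modify head [] (fun bs => bs ++ [neg_lits])
          else d) d).getD q [] → x ∈ body → p x := by
  intro L
  induction L with
  | nil => intro d hd _ q body x hb hx; exact hd q body x hb hx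
  | cons clause L ih =>
    intro d hd hL q body x hb hx
    rw [List.foldl_cons] at hb
    refine ih _ ?_ (fun c hc => hL c (List.mem_cons_of_mem _ hc)) q body x hb hx
    intro q' body' x' hb' hx'
    rw [pvBuild_step_getD] at hb'
    split at hb'
    · rcases List.mem_append.mp hb' with h | h
      · exact hd q' body' x' h hx'
      · rw [List.mem_singleton.mp h] at hx'
        obtain ⟨l, hl, rfl⟩ := List.mem_map.mp hx'
        have := List.mem_filter.mp hl
        exact hL clause List.mem_cons_self l this.1 (by simpa using this.2)
    · exact hd q' body' x' hb' hx'

lemma pvBuild_getD_mem (KB : List (List Int)) :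
    ∀ q body x, body ∈ (build_horn_kb KB).getD q [] → x ∈ body →
      x ∈ KB.flatten.map (fun l => -l) := by
  intro q body x hb hx
  refine pvBuild_aux_mem (fun y => y ∈ KB.flatten.map (fun l => -l)) KB PySem.Dict.empty
    (fun q' body' x' hb' _ => by simp [PySem.Dict.getD_empty] at hb')
    (fun clause hc l hl _ => List.mem_map.mpr
      ⟨l, List.mem_flatten.mpr ⟨clause, hc, hl⟩, rfl⟩) q body x hb hx

lemma pvBuild_aux_len :
    ∀ (L : List (List Int)) (d : PySem.Dict Int (List (List Int))) (n : Nat),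
      (∀ q, (d.getD q []).length ≤ n) →
      ∀ q, ((L.foldl (fun d clause =>
          let pos_lits := clause.filter (fun l => decide (l > 0))
          let neg_lits := (clause.filter (fun l => decide (l < 0))).map (fun l => -l)
          if pos_lits.length = 1 then
            let head := pos_lits.headD 0
            let d1 := if d.contains head then d else d.insert head []
            d1.modify head [] (fun bs => bs ++ [neg_lits])
          else d) d).getD q []).length ≤ n + L.length := by
  intro L
  induction L with
  | nil => intro d n hd q; simpa using hd q
  | cons clause L ih =>
    intro d n hd q
    rw [List.foldl_cons]
    have h2 : ∀ q', (((fun (d : PySem.Dict Int (List (List Int))) (clause : List Int) =>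
        let pos_lits := clause.filter (fun l => decide (l > 0))
        let neg_lits := (clause.filter (fun l => decide (l < 0))).map (fun l => -l)
        if pos_lits.length = 1 then
          let head := pos_lits.headD 0
          let d1 := if d.contains head then d else d.insert head []
          d1.modify head [] (fun bs => bs ++ [neg_lits])
        else d) d clause).getD q' []).length ≤ n + 1 := by
      intro q'
      rw [pvBuild_step_getD]
      split
      · simpa using Nat.add_le_add_right (hd q') 1
      · exact Nat.le_succ_of_le (hd q')
    have h3 := ih _ (n + 1) h2 q
    simpa [Nat.add_assoc, Nat.add_comm 1] using h3

lemma pvBuild_getD_len (KB : List (List Int)) :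
    ∀ q, ((build_horn_kb KB).getD q []).length ≤ KB.length := by
  intro q
  have h := pvBuild_aux_len KB PySem.Dict.empty 0
    (fun q' => by simp [PySem.Dict.getD_empty]) q
  rw [Nat.zero_add] at h
  exact h

lemma pvCard_add_lt (S : Finset Int) (visited : List Int) (q : Int)
    (hqS : q ∈ S) (hv : q ∉ visited) :
    (S.filter (fun x => x ∉ PySem.Set.add visited q)).card
      < (S.filter (fun x => x ∉ visited)).card := by
  apply Finset.card_lt_card
  have hsub : (S.filter (fun x => x ∉ PySem.Set.add visited q))
      ⊆ (S.filter (fun x => x ∉ visited)) := by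
    intro x hx
    rw [Finset.mem_filter] at *
    exact ⟨hx.1, fun hxv => hx.2 ((PySem.Set.mem_add _ _ _).mpr (Or.inl hxv))⟩
  refine Finset.ssubset_def.mpr ⟨hsub, fun hsup => ?_⟩
  have hq' := hsup (Finset.mem_filter.mpr ⟨hqS, hv⟩)
  rw [Finset.mem_filter] at hq'
  exact hq'.2 ((PySem.Set.mem_add _ _ _).mpr (Or.inr rfl))

-- fol_bc_ask, transliterated; the Finset S with hypotheses hh/hq are termination support only
-- (every subgoal ever queried lies in S). In Python, visited.copy() makes the child's set
-- visited ∪ {q} while the parent's set is untouched between iterations, and the final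
-- visited.remove(q) acts on the parent's private copy, so it is unobservable: the ports pass
-- the persistent value PySem.Set.add visited q to each child, exactly Python's behaviour.
mutual
def fol_bc_ask (horn : PySem.Dict Int (List (List Int))) (S : Finset Int)
    (hh : ∀ q body x, body ∈ horn.getD q [] → x ∈ body → x ∈ S)
    (query visited : List Int) (stats : Int)
    (hq : ∀ x ∈ query, x ∈ S) : Bool × Int :=
  -- stats[0] += 1 on entry
  match query with
  | [] => (true, stats + 1)
  | q :: rest_query =>
    if hv : q ∈ visited then (false, stats + 1)
    else
      -- visited.add(q); for body in horn_kb[q] (if q in horn_kb, else no iterations): …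
      fol_bc_bodies horn S hh q rest_query (PySem.Set.add visited q) (horn.getD q [])
        (stats + 1)
        (hq q List.mem_cons_self)
        (fun b hb x hx => hh q b x hb hx)
        (fun x hx => hq x (List.mem_cons_of_mem q hx))
  termination_by ((S.filter (fun x => x ∉ visited)).card, 0)
  decreasing_by
    exact Prod.Lex.left _ _ (pvCard_add_lt S visited q (hq q List.mem_cons_self) hv)

def fol_bc_bodies (horn : PySem.Dict Int (List (List Int))) (S : Finset Int)
    (hh : ∀ q body x, body ∈ horn.getD q [] → x ∈ body → x ∈ S)
    (q : Int) (rest_query visited : List Int) (bodies : List (List Int)) (stats : Int)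
    (hqS : q ∈ S)
    (hb : ∀ b ∈ bodies, ∀ x ∈ b, x ∈ S)
    (hr : ∀ x ∈ rest_query, x ∈ S) : Bool × Int :=
  match bodies with
  | [] => (false, stats)          -- visited.remove(q); return False (remove unobservable, see above)
  | body :: bs =>
    let r := fol_bc_ask horn S hh (body ++ rest_query) visited stats
      (fun x hx => (List.mem_append.mp hx).elim (fun h => hb body List.mem_cons_self x h)
        (fun h => hr x h))
    if r.1 then r
    else fol_bc_bodies horn S hh q rest_query visited bs r.2 hqS
      (fun b h x hx => hb b (List.mem_cons_of_mem body h) x hx) hr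
  termination_by ((S.filter (fun x => x ∉ visited)).card, bodies.length + 1)
  decreasing_by
  · exact Prod.Lex.right _ (by simp)
  · exact Prod.Lex.right _ (by simp)
end

def run_backward_chaining (KB : List (List Int)) (i : Int) (j : Int) (v : Int) (N : Int) : Bool × Int :=
  let horn := build_horn_kb KB
  let target := get_var_id i j v N
  let S : Finset Int := insert target (KB.flatten.map (fun l => -l)).toFinset
  fol_bc_ask horn S
    (fun q body x h hx => Finset.mem_insert_of_mem (List.mem_toFinset.mpr (pvBuild_getD_mem KB q body x h hx)))
    [target] [] 0
    (fun x hx => by rw [List.mem_singleton.mp hx]; exact Finset.mem_insert_self _ _)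

-- ===== PORT B =====
def build_horn_alt (clauses : List (List Int)) : PySem.Dict Int (List (List Int)) :=
  clauses.foldl (fun d clause =>
    let pos := clause.filter (fun l => decide (l > 0))
    if pos.length = 1 then
      -- horn.setdefault(pos[0], []).append([-l for l in clause if l < 0])
      (d.setdefault (pos.headD 0) []).modify (pos.headD 0) []
        (fun bs => bs ++ [(clause.filter (fun l => decide (l < 0))).map (fun l => -l)])
    else d) PySem.Dict.empty

lemma pvBuild_alt_eq (KB : List (List Int)) : build_horn_alt KB = build_horn_kb KB := by
  unfold build_horn_alt build_horn_kb
  congr 1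
  funext d clause
  by_cases hp : (clause.filter (fun l => decide (l > 0))).length = 1
  · simp only [hp, if_true]
    by_cases hc : d.contains ((clause.filter (fun l => decide (l > 0))).headD 0)
    · rw [PySem.Dict.setdefault_of_contains d [] hc, if_pos hc]
    · have hc' : d.contains ((clause.filter (fun l => decide (l > 0))).headD 0) = false := by
        rwa [Bool.not_eq_true] at hc
      rw [PySem.Dict.setdefault_of_not_contains d [] hc', if_neg hc]
  · simp [hp]

lemma pvSum_children_lt (S : Finset Int) (m : Nat) (visited : List Int) (q : Int)
    (hqS : q ∈ S) (hv : q ∉ visited) (len : Nat) (hlen : len ≤ m) :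
    len * (m + 2) ^ ((S.filter (fun x => x ∉ PySem.Set.add visited q)).card)
      < (m + 2) ^ ((S.filter (fun x => x ∉ visited)).card) := by
  have hlt := pvCard_add_lt S visited q hqS hv
  calc len * (m + 2) ^ ((S.filter (fun x => x ∉ PySem.Set.add visited q)).card)
      ≤ m * (m + 2) ^ ((S.filter (fun x => x ∉ PySem.Set.add visited q)).card) :=
        Nat.mul_le_mul_right _ hlen
    _ < (m + 2) * (m + 2) ^ ((S.filter (fun x => x ∉ PySem.Set.add visited q)).card) :=
        (Nat.mul_lt_mul_right (Nat.pow_pos (by omega))).mpr (by omega)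
    _ = (m + 2) ^ ((S.filter (fun x => x ∉ PySem.Set.add visited q)).card + 1) := by ring
    _ ≤ (m + 2) ^ ((S.filter (fun x => x ∉ visited)).card) :=
        Nat.pow_le_pow_right (by omega) (by omega)

-- Source B's while-loop over a stack whose TOP is the Python list's END: here the stack is a list
-- with the top frame at its HEAD, so 'stack.extend(… for body in reversed(children))' becomes
-- prepending the children in their original order. 'visited | {q}' is PySem.Set.add visited q
-- (exact: q ∉ visited on this branch). S, hh, m, hm, hstk are termination support only.
def bc_loop (horn : PySem.Dict Int (List (List Int))) (S : Finset Int)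
    (hh : ∀ q body x, body ∈ horn.getD q [] → x ∈ body → x ∈ S)
    (m : Nat) (hm : ∀ q, (horn.getD q []).length ≤ m)
    (stack : List (List Int × List Int)) (count : Int)
    (hstk : ∀ f ∈ stack, ∀ x ∈ f.1, x ∈ S) : Bool × Int :=
  match stack with
  | [] => (false, count)
  | (query, visited) :: rest =>
    match query with
    | [] => (true, count + 1)
    | q :: qrest =>
      if hv : q ∈ visited then
        bc_loop horn S hh m hm rest (count + 1)
          (fun f hf => hstk f (List.mem_cons_of_mem _ hf))
      else
        bc_loop horn S hh m hm
          (((horn.getD q []).map (fun body => (body ++ qrest, PySem.Set.add visited q))) ++ rest)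
          (count + 1)
          (by
            intro f hf x hx
            rcases List.mem_append.mp hf with hf | hf
            · obtain ⟨body, hb, rfl⟩ := List.mem_map.mp hf
              rcases List.mem_append.mp hx with hx | hx
              · exact hh q body x hb hx
              · exact hstk (q :: qrest, visited) List.mem_cons_self x (List.mem_cons_of_mem q hx)
            · exact hstk f (List.mem_cons_of_mem _ hf) x hx)
  termination_by (stack.map (fun f => (m + 2) ^ ((S.filter (fun x => x ∉ f.2)).card))).sum
  decreasing_by
  · simp only [List.map_cons, List.sum_cons]
    have : 0 < (m + 2) ^ ((S.filter (fun x => x ∉ visited)).card) := Nat.pow_pos (by omega)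
    omega
  · simp only [List.map_append, List.map_cons, List.sum_append, List.sum_cons, List.map_map,
      Function.comp_def]
    have h1 := pvSum_children_lt S m visited q
      (hstk (q :: qrest, visited) List.mem_cons_self q List.mem_cons_self) hv
      (horn.getD q []).length (hm q)
    refine lt_of_le_of_lt (Nat.add_le_add_right (List.sum_le_card_nsmul _
      ((m + 2) ^ ((S.filter (fun x => x ∉ PySem.Set.add visited q)).card)) ?_) _) ?_
    · intro x hx
      obtain ⟨b, _, rfl⟩ := List.mem_map.mp hx
      exact Nat.le_refl _
    · simp only [List.length_map, smul_eq_mul]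
      omega

def run_backward_chaining_alt (KB : List (List Int)) (i : Int) (j : Int) (v : Int) (N : Int) : Bool × Int :=
  let horn := build_horn_alt KB
  let target := (i - 1) * N ^ 2 + (j - 1) * N + v
  let S : Finset Int := insert target (KB.flatten.map (fun l => -l)).toFinset
  bc_loop horn S
    (fun q body x h hx => by
      refine Finset.mem_insert_of_mem (List.mem_toFinset.mpr (pvBuild_getD_mem KB q body x ?_ hx))
      have h' : body ∈ (build_horn_alt KB).getD q [] := h
      rwa [pvBuild_alt_eq] at h')
    KB.length
    (fun q => by
      show ((build_horn_alt KB).getD q []).length ≤ KB.length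
      rw [pvBuild_alt_eq]; exact pvBuild_getD_len KB q)
    [([target], [])] 0
    (fun f hf x hx => by
      rw [List.mem_singleton.mp hf] at hx
      rw [List.mem_singleton.mp hx]; exact Finset.mem_insert_self _ _)

-- ===== PRECONDITION & SPEC =====
def Spec_run_backward_chaining (KB : List (List Int)) (i : Int) (j : Int) (v : Int) (N : Int) (out : Bool × Int) : Prop := out = run_backward_chaining_alt KB i j v N
instance (KB : List (List Int)) (i : Int) (j : Int) (v : Int) (N : Int) (out : Bool × Int) : Decidable (Spec_run_backward_chaining KB i j v N out) := by unfold Spec_run_backward_chaining; infer_instance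

-- ===== CLAIM (what is proved, stated in full; the proofs are below) =====
def Claim_equal_run_backward_chaining : Prop := ∀ (KB : List (List Int)) (i : Int) (j : Int) (v : Int) (N : Int), Dom_run_backward_chaining KB i j v N → Spec_run_backward_chaining KB i j v N (run_backward_chaining KB i j v N)

-- ===== LEMMAS AND PROOFS =====

lemma pv_ask_pi (horn : PySem.Dict Int (List (List Int))) (S : Finset Int)
    (hh : ∀ q body x, body ∈ horn.getD q [] → x ∈ body → x ∈ S)
    (query visited : List Int) (stats : Int) (hq hq' : ∀ x ∈ query, x ∈ S) :
    fol_bc_ask horn S hh query visited stats hq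
      = fol_bc_ask horn S hh query visited stats hq' := by
  rw [proof_irrel hq hq']

lemma pv_loop_pi (horn : PySem.Dict Int (List (List Int))) (S : Finset Int)
    (hh : ∀ q body x, body ∈ horn.getD q [] → x ∈ body → x ∈ S)
    (m : Nat) (hm : ∀ q, (horn.getD q []).length ≤ m)
    (stack : List (List Int × List Int)) (count : Int)
    (h1 h2 : ∀ f ∈ stack, ∀ x ∈ f.1, x ∈ S) :
    bc_loop horn S hh m hm stack count h1 = bc_loop horn S hh m hm stack count h2 := by
  rw [proof_irrel h1 h2]

lemma pv_sim (horn : PySem.Dict Int (List (List Int))) (S : Finset Int)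
    (hh : ∀ q body x, body ∈ horn.getD q [] → x ∈ body → x ∈ S)
    (m : Nat) (hm : ∀ q, (horn.getD q []).length ≤ m) :
    ∀ (n : Nat) (query visited : List Int) (stats : Int)
      (hq : ∀ x ∈ query, x ∈ S)
      (rest : List (List Int × List Int))
      (hstk1 : ∀ f ∈ (query, visited) :: rest, ∀ x ∈ f.1, x ∈ S)
      (hrest : ∀ f ∈ rest, ∀ x ∈ f.1, x ∈ S),
      (S.filter (fun x => x ∉ visited)).card ≤ n →
      bc_loop horn S hh m hm ((query, visited) :: rest) stats hstk1
        = (let r := fol_bc_ask horn S hh query visited stats hq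
           if r.1 then r else bc_loop horn S hh m hm rest r.2 hrest) := by
  intro n
  induction n using Nat.strong_induction_on with
  | _ n IH =>
  intro query visited stats hq rest hstk1 hrest hcard
  match query with
  | [] =>
    rw [bc_loop, fol_bc_ask]
    simp
  | q :: qrest =>
    by_cases hv : q ∈ visited
    · rw [bc_loop, fol_bc_ask]
      simp only [hv, dif_pos]
      exact pv_loop_pi _ _ _ _ _ _ _ _ _
    · rw [bc_loop, fol_bc_ask]
      simp only [hv, dif_neg, not_false_iff]
      have hqS : q ∈ S := hq q List.mem_cons_self
      have hrq : ∀ x ∈ qrest, x ∈ S := fun x hx => hq x (List.mem_cons_of_mem q hx)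
      have hcard' : (S.filter (fun x => x ∉ PySem.Set.add visited q)).card < n :=
        Nat.lt_of_lt_of_le (pvCard_add_lt S visited q hqS hv) hcard
      -- inner: process the pushed children one by one
      have inner : ∀ (bodies : List (List Int))
          (hb : ∀ b ∈ bodies, ∀ x ∈ b, x ∈ S) (stats' : Int)
          (h1 : ∀ f ∈ (bodies.map (fun body =>
              (body ++ qrest, PySem.Set.add visited q))) ++ rest, ∀ x ∈ f.1, x ∈ S),
          bc_loop horn S hh m hm
              ((bodies.map (fun body => (body ++ qrest, PySem.Set.add visited q))) ++ rest)
              stats' h1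
            = (let r := fol_bc_bodies horn S hh q qrest (PySem.Set.add visited q) bodies stats'
                  hqS hb hrq
               if r.1 then r else bc_loop horn S hh m hm rest r.2 hrest) := by
        intro bodies
        induction bodies with
        | nil =>
          intro hb stats' h1
          rw [fol_bc_bodies]
          simp only [List.map_nil, List.nil_append] at h1 ⊢
          exact pv_loop_pi _ _ _ _ _ _ _ _ _
        | cons body bs ihb =>
          intro hb stats' h1
          simp only [List.map_cons, List.cons_append]
          have hq1 : ∀ x ∈ body ++ qrest, x ∈ S := fun x hx =>
            (List.mem_append.mp hx).elim (fun h => hb body List.mem_cons_self x h)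
              (fun h => hrq x h)
          rw [IH _ hcard' (body ++ qrest) (PySem.Set.add visited q) stats' hq1
            ((bs.map (fun body => (body ++ qrest, PySem.Set.add visited q))) ++ rest)
            (by
              intro f hf x hx
              rcases List.mem_cons.mp hf with rfl | hf
              · exact hq1 x hx
              · rcases List.mem_append.mp hf with hf | hf
                · obtain ⟨b, hbmem, rfl⟩ := List.mem_map.mp hf
                  rcases List.mem_append.mp hx with hx | hx
                  · exact hb b (List.mem_cons_of_mem body hbmem) x hx
                  · exact hrq x hx
                · exact hrest f hf x hx)
            (by
              intro f hf x hx
              rcases List.mem_append.mp hf with hf | hf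
              · obtain ⟨b, hbmem, rfl⟩ := List.mem_map.mp hf
                rcases List.mem_append.mp hx with hx | hx
                · exact hb b (List.mem_cons_of_mem body hbmem) x hx
                · exact hrq x hx
              · exact hrest f hf x hx)
            (Nat.le_refl _)]
          rw [fol_bc_bodies]
          simp only []
          rw [pv_ask_pi horn S hh (body ++ qrest) (PySem.Set.add visited q) stats' _ hq1]
          cases hr1 : (fol_bc_ask horn S hh (body ++ qrest) (PySem.Set.add visited q) stats' hq1).1
          · simp only [if_neg, Bool.false_eq_true, not_false_iff]
            rw [ihb (fun b h x hx => hb b (List.mem_cons_of_mem body h) x hx) _ _]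
          · simp only [hr1, if_pos]
      rw [inner (horn.getD q [])
        (fun b hbm x hx => hh q b x hbm hx) (stats + 1) _]

lemma pv_ask_horn_congr (horn horn' : PySem.Dict Int (List (List Int)))
    (e : horn = horn') (S : Finset Int)
    (hh : ∀ q body x, body ∈ horn.getD q [] → x ∈ body → x ∈ S)
    (hh' : ∀ q body x, body ∈ horn'.getD q [] → x ∈ body → x ∈ S)
    (query visited : List Int) (stats : Int)
    (hq hq' : ∀ x ∈ query, x ∈ S) :
    fol_bc_ask horn S hh query visited stats hq
      = fol_bc_ask horn' S hh' query visited stats hq' := by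
  subst e
  rw [proof_irrel hh hh', proof_irrel hq hq']

-- ===== VERDICT (by name: the statement is the Claim_ definition above) =====
theorem run_backward_chaining_spec : Claim_equal_run_backward_chaining := by
  intro KB i j v N _
  unfold Spec_run_backward_chaining run_backward_chaining run_backward_chaining_alt get_var_id
  simp only []
  rw [pv_sim (build_horn_alt KB)
      (insert (((i - 1) * N ^ 2 + (j - 1) * N + v)) (KB.flatten.map (fun l => -l)).toFinset)
      (fun q body x h hx => by
        refine Finset.mem_insert_of_mem (List.mem_toFinset.mpr
          (pvBuild_getD_mem KB q body x ?_ hx))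
        rwa [pvBuild_alt_eq] at h)
      KB.length
      (fun q => by rw [pvBuild_alt_eq]; exact pvBuild_getD_len KB q)
      (insert (((i - 1) * N ^ 2 + (j - 1) * N + v)) (KB.flatten.map (fun l => -l)).toFinset).card
      [((i - 1) * N ^ 2 + (j - 1) * N + v)] [] 0
      (fun x hx => by rw [List.mem_singleton.mp hx]; exact Finset.mem_insert_self _ _)
      []
      (fun f hf x hx => by
        rw [List.mem_singleton.mp hf] at hx
        rw [List.mem_singleton.mp hx]; exact Finset.mem_insert_self _ _)
      (fun f hf => absurd hf (List.not_mem_nil))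
      (Finset.card_filter_le _ _)]
  simp only []
  rw [pv_ask_horn_congr (build_horn_alt KB) (build_horn_kb KB) (pvBuild_alt_eq KB)
      (insert (((i - 1) * N ^ 2 + (j - 1) * N + v)) (KB.flatten.map (fun l => -l)).toFinset)
      (fun q body x h hx => by
        refine Finset.mem_insert_of_mem (List.mem_toFinset.mpr
          (pvBuild_getD_mem KB q body x ?_ hx))
        rwa [pvBuild_alt_eq] at h)
      (fun q body x h hx => Finset.mem_insert_of_mem (List.mem_toFinset.mpr
        (pvBuild_getD_mem KB q body x h hx)))
      [((i - 1) * N ^ 2 + (j - 1) * N + v)] [] 0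
      (fun x hx => by rw [List.mem_singleton.mp hx]; exact Finset.mem_insert_self _ _)
      (fun x hx => by rw [List.mem_singleton.mp hx]; exact Finset.mem_insert_self _ _)]
  cases hr : (fol_bc_ask (build_horn_kb KB)
      (insert (((i - 1) * N ^ 2 + (j - 1) * N + v)) (KB.flatten.map (fun l => -l)).toFinset)
      (fun q body x h hx => Finset.mem_insert_of_mem (List.mem_toFinset.mpr
        (pvBuild_getD_mem KB q body x h hx)))
      [((i - 1) * N ^ 2 + (j - 1) * N + v)] [] 0
      (fun x hx => by rw [List.mem_singleton.mp hx]; exact Finset.mem_insert_self _ _)).1 with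
  | false =>
    simp only [Bool.false_eq_true, if_false]
    rw [bc_loop]
    exact Prod.ext_iff.mpr ⟨by rw [hr], rfl⟩
  | true =>
    simp only [if_true]
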